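-- pv_equiv track=rewrite | github.com/Birsenn/PythonProgrammingForDataScience | practices/practices9.py | klengthpref
-- ===== SOURCE A (Python) =====
-- def klengthpref(arr, n, k, s):
--     if len(s) < k:
--         return 0
--
--     str = s[0:k]
--     count = 0
--     for i in arr:
--         if str == i[0:k]:
--             count += 1
--     return count
-- ===== SOURCE B (Python) =====
-- def _bisect_left(a, x):
--     lo, hi = 0, len(a)
--     while lo < hi:
--         mid = (lo + hi) // 2
--         if a[mid] < x:
--             lo = mid + 1
--         else:
--             hi = mid
--     return lo
--
--
-- def _bisect_right(a, x):
--     lo, hi = 0, len(a)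
--     while lo < hi:
--         mid = (lo + hi) // 2
--         if x < a[mid]:
--             hi = mid
--         else:
--             lo = mid + 1
--     return lo
--
--
-- def klengthpref(arr, n, k, s):
--     if len(s) < k:
--         return 0
--     pres = sorted(i[0:k] for i in arr)
--     t = s[0:k]
--     return _bisect_right(pres, t) - _bisect_left(pres, t)
-- ===== Notes on version B (the rewrite author's own statement) =====
-- stated objective: alternative
-- what changed: Replaces A's linear scan comparing each element's k-prefix with the target by sorting the list of k-prefixes and locating the target prefix's run with two hand-written binary searches (bisect_right - bisect_left).
import Mathlib
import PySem

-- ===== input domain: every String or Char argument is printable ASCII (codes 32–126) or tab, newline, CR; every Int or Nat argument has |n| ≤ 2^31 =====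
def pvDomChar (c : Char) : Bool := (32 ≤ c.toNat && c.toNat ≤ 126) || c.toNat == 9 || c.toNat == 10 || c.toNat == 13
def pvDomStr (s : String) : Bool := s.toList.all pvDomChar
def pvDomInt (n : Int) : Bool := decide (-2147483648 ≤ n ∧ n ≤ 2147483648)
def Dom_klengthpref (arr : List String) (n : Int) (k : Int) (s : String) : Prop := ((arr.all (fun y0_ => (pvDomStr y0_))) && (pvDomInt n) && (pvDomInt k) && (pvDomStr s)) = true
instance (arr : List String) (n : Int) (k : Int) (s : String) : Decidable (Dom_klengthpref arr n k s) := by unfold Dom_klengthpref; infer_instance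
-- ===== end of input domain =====

-- B sorts the k-prefixes and answers with two hand-written binary searches
-- (bisect_right - bisect_left) instead of A's linear comparison scan (alternative algorithm).

-- ===== PORT A =====
def klengthpref (arr : List String) (n : Int) (k : Int) (s : String) : Int :=
  if (s.toList.length : Int) < k then 0
  else
    let pre := PySem.List.slice s.toList (some 0) (some k)
    arr.foldl (fun count i =>
      if pre = PySem.List.slice i.toList (some 0) (some k) then count + 1 else count) 0

-- ===== PORT B =====
-- hand-written bisect_left from Source B: while lo < hi: mid = (lo+hi)//2; branch
-- (lo, hi are Python non-negative ints here, ported as Nat; a[mid] is always in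
-- range on the real calls, ported totally with getD)
def klBisectLeft (a : List (List Char)) (x : List Char) (lo hi : Nat) : Nat :=
  if lo < hi then
    let mid := (lo + hi) / 2
    if a.getD mid [] < x then klBisectLeft a x (mid + 1) hi
    else klBisectLeft a x lo mid
  else lo
termination_by hi - lo
decreasing_by all_goals omega

-- hand-written bisect_right from Source B
def klBisectRight (a : List (List Char)) (x : List Char) (lo hi : Nat) : Nat :=
  if lo < hi then
    let mid := (lo + hi) / 2
    if x < a.getD mid [] then klBisectRight a x lo mid
    else klBisectRight a x (mid + 1) hi
  else lo
termination_by hi - lo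
decreasing_by all_goals omega

def klengthpref_alt (arr : List String) (n : Int) (k : Int) (s : String) : Int :=
  if (s.toList.length : Int) < k then 0
  else
    -- sorted(...) on Python strings = PySem.List.sorted under the lexicographic order on
    -- List Char (instances pinned to Mathlib's LinearOrder, defeq to core's)
    let pres := @PySem.List.sorted _ _ List.instLinearOrder.toLT LinearOrder.toDecidableLT
      (arr.map (fun i => PySem.List.slice i.toList (some 0) (some k))) (fun x => x) false
    let t := PySem.List.slice s.toList (some 0) (some k)
    (klBisectRight pres t 0 pres.length : Int) - (klBisectLeft pres t 0 pres.length : Int)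

-- ===== PRECONDITION & SPEC =====
def Spec_klengthpref (arr : List String) (n : Int) (k : Int) (s : String) (out : Int) : Prop := out = klengthpref_alt arr n k s
instance (arr : List String) (n : Int) (k : Int) (s : String) (out : Int) : Decidable (Spec_klengthpref arr n k s out) := by unfold Spec_klengthpref; infer_instance

-- ===== CLAIM (what is proved, stated in full; the proofs are below) =====
def Claim_equal_klengthpref : Prop := ∀ (arr : List String) (n : Int) (k : Int) (s : String), Dom_klengthpref arr n k s → Spec_klengthpref arr n k s (klengthpref arr n k s)


-- ===== LEMMAS AND PROOFS =====

-- sortedness gives index monotonicity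
theorem klMonoGetElem (a : List (List Char)) (hs : a.Pairwise (· ≤ ·))
    (i j : Nat) (hij : i ≤ j) (hj : j < a.length) :
    a[i]'(lt_of_le_of_lt hij hj) ≤ a[j] := by
  rcases eq_or_lt_of_le hij with rfl | hlt
  · exact le_refl _
  · exact (List.pairwise_iff_getElem.mp hs) i j _ hj hlt

-- A's scan, with accumulator c, adds the number of array prefixes equal to pre
theorem kl_scanA (pre : List Char) (k : Int) (arr : List String) (c : Int) :
    arr.foldl (fun count i =>
        if pre = PySem.List.slice i.toList (some 0) (some k) then count + 1 else count) c
      = c + ((arr.map (fun i => PySem.List.slice i.toList (some 0) (some k))).count pre : Int) := by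
  induction arr generalizing c with
  | nil => simp
  | cons x xs ih =>
    simp only [List.foldl_cons, List.map_cons, List.count_cons, ih]
    by_cases h : pre = PySem.List.slice x.toList (some 0) (some k)
    · have hb : (PySem.List.slice x.toList (some 0) (some k) == pre) = true :=
        beq_iff_eq.mpr h.symm
      simp only [if_pos h, hb, if_pos]
      push_cast; ring
    · have hb : (PySem.List.slice x.toList (some 0) (some k) == pre) = false :=
        beq_eq_false_iff_ne.mpr (fun e => h e.symm)
      simp only [if_neg h, hb]
      simp

-- binary-search loop invariant for bisect_left on a sorted list
theorem klBisectLeft_spec (a : List (List Char)) (x : List Char)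
    (hs : a.Pairwise (· ≤ ·)) :
    ∀ (d lo hi : Nat), hi - lo ≤ d → lo ≤ hi → hi ≤ a.length →
    (∀ j, j < lo → ∀ (h : j < a.length), a[j] < x) →
    (∀ j, hi ≤ j → ∀ (h : j < a.length), x ≤ a[j]) →
    klBisectLeft a x lo hi ≤ a.length ∧
      (∀ j, j < klBisectLeft a x lo hi → ∀ (h : j < a.length), a[j] < x) ∧
      (∀ j, klBisectLeft a x lo hi ≤ j → ∀ (h : j < a.length), x ≤ a[j]) := by
  intro d
  induction d with
  | zero =>
    intro lo hi hd hlh hhl hlo hhi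
    have : lo = hi := by omega
    subst this
    rw [klBisectLeft, if_neg (lt_irrefl lo)]
    exact ⟨hhl, hlo, hhi⟩
  | succ e ih =>
    intro lo hi hd hlh hhl hlo hhi
    rw [klBisectLeft]
    by_cases hc : lo < hi
    · rw [if_pos hc]
      have hmlen : (lo + hi) / 2 < a.length := by omega
      have hget : a.getD ((lo + hi) / 2) [] = a[(lo + hi) / 2] := List.getD_eq_getElem a [] hmlen
      simp only [hget]
      by_cases hm : a[(lo + hi) / 2] < x
      · rw [if_pos hm]
        exact ih ((lo + hi) / 2 + 1) hi (by omega) (by omega) hhl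
          (fun j hj h => by
            rcases Nat.lt_or_ge j lo with hjl | hjge
            · exact hlo j hjl h
            · exact lt_of_le_of_lt (klMonoGetElem a hs j ((lo + hi) / 2) (by omega) hmlen) hm)
          hhi
      · rw [if_neg hm]
        exact ih lo ((lo + hi) / 2) (by omega) (by omega) (by omega) hlo
          (fun j hj h =>
            le_trans (not_lt.mp hm) (klMonoGetElem a hs ((lo + hi) / 2) j hj h))
    · rw [if_neg hc]
      have : lo = hi := by omega
      subst this
      exact ⟨hhl, hlo, hhi⟩

-- binary-search loop invariant for bisect_right on a sorted list
theorem klBisectRight_spec (a : List (List Char)) (x : List Char)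
    (hs : a.Pairwise (· ≤ ·)) :
    ∀ (d lo hi : Nat), hi - lo ≤ d → lo ≤ hi → hi ≤ a.length →
    (∀ j, j < lo → ∀ (h : j < a.length), a[j] ≤ x) →
    (∀ j, hi ≤ j → ∀ (h : j < a.length), x < a[j]) →
    klBisectRight a x lo hi ≤ a.length ∧
      (∀ j, j < klBisectRight a x lo hi → ∀ (h : j < a.length), a[j] ≤ x) ∧
      (∀ j, klBisectRight a x lo hi ≤ j → ∀ (h : j < a.length), x < a[j]) := by
  intro d
  induction d with
  | zero =>
    intro lo hi hd hlh hhl hlo hhi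
    have : lo = hi := by omega
    subst this
    rw [klBisectRight, if_neg (lt_irrefl lo)]
    exact ⟨hhl, hlo, hhi⟩
  | succ e ih =>
    intro lo hi hd hlh hhl hlo hhi
    rw [klBisectRight]
    by_cases hc : lo < hi
    · rw [if_pos hc]
      have hmlen : (lo + hi) / 2 < a.length := by omega
      have hget : a.getD ((lo + hi) / 2) [] = a[(lo + hi) / 2] := List.getD_eq_getElem a [] hmlen
      simp only [hget]
      by_cases hm : x < a[(lo + hi) / 2]
      · rw [if_pos hm]
        exact ih lo ((lo + hi) / 2) (by omega) (by omega) (by omega) hlo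
          (fun j hj h =>
            lt_of_lt_of_le hm (klMonoGetElem a hs ((lo + hi) / 2) j hj h))
      · rw [if_neg hm]
        exact ih ((lo + hi) / 2 + 1) hi (by omega) (by omega) hhl
          (fun j hj h => by
            rcases Nat.lt_or_ge j lo with hjl | hjge
            · exact hlo j hjl h
            · exact le_trans (klMonoGetElem a hs j ((lo + hi) / 2) (by omega) hmlen) (not_lt.mp hm))
          hhi
    · rw [if_neg hc]
      have : lo = hi := by omega
      subst this
      exact ⟨hhl, hlo, hhi⟩

-- a split position between "p holds" and "p fails" IS countP
theorem countP_eq_split (a : List (List Char)) (p : List Char → Bool) (r : Nat)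
    (hr : r ≤ a.length)
    (h1 : ∀ j, j < r → ∀ (h : j < a.length), p a[j])
    (h2 : ∀ j, r ≤ j → ∀ (h : j < a.length), ¬ p a[j]) :
    a.countP p = r := by
  conv_lhs => rw [← List.take_append_drop r a]
  rw [List.countP_append]
  have htake : (a.take r).countP p = r := by
    rw [List.countP_eq_length.mpr, List.length_take]
    · omega
    · intro y hy
      obtain ⟨i, hi, hget⟩ := List.mem_iff_getElem.mp hy
      have hi' : i < r := by simp [List.length_take] at hi; omega
      have hil : i < a.length := by simp [List.length_take] at hi; omega
      rw [← hget, List.getElem_take]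
      exact h1 i hi' hil
  have hdrop : (a.drop r).countP p = 0 := by
    rw [List.countP_eq_zero]
    intro y hy
    obtain ⟨i, hi, hget⟩ := List.mem_iff_getElem.mp hy
    have hil : r + i < a.length := by simp [List.length_drop] at hi; omega
    rw [← hget, List.getElem_drop]
    exact h2 (r + i) (by omega) hil
  omega

-- the ≤-count minus the <-count is the multiplicity
theorem countP_le_sub_lt (x : List Char) (a : List (List Char)) :
    (a.countP (fun y => decide (y ≤ x)) : Int) - (a.countP (fun y => decide (y < x)) : Int)
      = (a.count x : Int) := by
  induction a with
  | nil => simp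
  | cons h t ih =>
    simp only [List.countP_cons, List.count_cons]
    rcases lt_trichotomy h x with hl | he | hg
    · have hb : (h == x) = false := by simp [ne_of_lt hl]
      simp only [decide_eq_true_eq, if_pos hl, if_pos (le_of_lt hl), hb,
        Bool.false_eq_true, not_false_iff, if_neg]
      push_cast; omega
    · subst he
      have hb : (h == h) = true := by simp
      simp only [decide_eq_true_eq, if_pos (le_refl h), if_neg (lt_irrefl h), hb]
      push_cast; omega
    · have hb : (h == x) = false := by simp [ne_of_gt hg]
      simp only [decide_eq_true_eq, if_neg (not_le.mpr hg), if_neg (not_lt.mpr hg.le), hb]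
      push_cast; omega

-- ===== VERDICT (by name: the statement is the Claim_ definition above) =====
theorem klengthpref_spec : Claim_equal_klengthpref := by
  intro arr nn k s _
  unfold Spec_klengthpref klengthpref klengthpref_alt
  split
  · rfl
  · rw [kl_scanA]
    set t := PySem.List.slice s.toList (some 0) (some k) with ht
    set L := arr.map (fun i => PySem.List.slice i.toList (some 0) (some k)) with hL
    set a := @PySem.List.sorted _ _ List.instLinearOrder.toLT LinearOrder.toDecidableLT L (fun x => x) false with ha
    show (0 : Int) + (L.count t : Int)
      = (klBisectRight a t 0 a.length : Int) - (klBisectLeft a t 0 a.length : Int)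
    have hs : a.Pairwise (· ≤ ·) := by
      rw [ha]; exact PySem.List.sorted_pairwise L (fun x => x)
    obtain ⟨hbl1, hbl2, hbl3⟩ := klBisectLeft_spec a t hs a.length 0 a.length
      (by omega) (Nat.zero_le _) le_rfl (by omega) (fun j hj h => absurd h (by omega))
    obtain ⟨hbr1, hbr2, hbr3⟩ := klBisectRight_spec a t hs a.length 0 a.length
      (by omega) (Nat.zero_le _) le_rfl (by omega) (fun j hj h => absurd h (by omega))
    have hLcl : klBisectLeft a t 0 a.length = a.countP (fun y => decide (y < t)) :=
      (countP_eq_split a _ _ hbl1 (by simpa using hbl2)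
        (by intro j hj h; simp only [decide_eq_true_eq]; exact not_lt.mpr (hbl3 j hj h))).symm
    have hRcl : klBisectRight a t 0 a.length = a.countP (fun y => decide (y ≤ t)) :=
      (countP_eq_split a _ _ hbr1 (by simpa using hbr2)
        (by intro j hj h; simp only [decide_eq_true_eq]; exact not_le.mpr (hbr3 j hj h))).symm
    have hperm : a.Perm L := by
      rw [ha]; exact @PySem.List.sorted_perm _ _ List.instLinearOrder.toLT LinearOrder.toDecidableLT L (fun x => x) false
    rw [hLcl, hRcl, countP_le_sub_lt, hperm.count_eq]
    omega
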